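-- pv_equiv track=rewrite | github.com/BrunoCroso/Codes-related-to-USP-Subjects | MAC0110 - Introduction to Computing/ep10.py | gera_gaps
-- ===== SOURCE A (Python) =====
-- def gera_gaps(dna):
--     ''' ( str ) -> list
--
--     RECEBE uma string `dna` representando uma fita de DNA com os
--     símbolos 'A', 'T', 'C', 'G' e '_' (GAP).
--
--     RETORNA uma lista com todas as variações de dna com um símbolo GAP
--     a mais e sem repetições.
--
--     exemplos:
--     In  [1]: gera_gaps( 'T' )
--     Out [1]: ['_T', 'T_']
--
--     In  [2]: gera_gaps( 'CA' )
--     Out [2]: ['_CA', 'C_A', 'CA_']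
--
--     In  [3]: gera_gaps( 'AT_G')
--     Out [3]: ['_AT_G', 'A_T_G', 'AT__G', 'AT_G_']
--     '''
--     # modifique o código abaixo para conter a sua solução.
--     variações = []
--     for i in range (len(dna) + 1):
--         primeira_metade = dna[:i]
--         segunda_metade = dna[i:]
--         novo = primeira_metade + '_' + segunda_metade
--         if variações.count(novo) == 0:
--             variações.append(novo)
--     return variações
-- ===== SOURCE B (Python) =====
-- def gera_gaps(dna):
--     variacoes = []
--     for j in range(len(dna) + 1):
--         if j == 0 or dna[j-1] != '_':
--             variacoes.append(dna[:j] + '_' + dna[j:])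
--     return variacoes
-- ===== Notes on version B (the rewrite author's own statement) =====
-- stated objective: faster
-- what changed: B drops A's dedup-by-membership scan (variacoes.count(novo)==0) entirely: inserting the gap at position j duplicates an earlier variant exactly when the previous character is already a gap, so B appends unconditionally unless j>0 and dna[j-1] is a gap, never scanning the accumulated list.
import Mathlib
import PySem

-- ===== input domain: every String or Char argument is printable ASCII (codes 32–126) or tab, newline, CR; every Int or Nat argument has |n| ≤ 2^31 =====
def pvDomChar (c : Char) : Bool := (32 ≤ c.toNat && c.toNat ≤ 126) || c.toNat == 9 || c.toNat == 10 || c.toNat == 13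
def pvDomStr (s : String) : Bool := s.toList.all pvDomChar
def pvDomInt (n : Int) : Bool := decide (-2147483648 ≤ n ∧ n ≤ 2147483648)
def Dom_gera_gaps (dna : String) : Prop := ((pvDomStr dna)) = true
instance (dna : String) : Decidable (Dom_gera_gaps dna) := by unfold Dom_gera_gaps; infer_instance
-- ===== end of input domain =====

-- B replaces A's membership (count) dedup by a local test — insert the gap at j only when
-- j = 0 or dna[j-1] is not already a gap — so no scan of the accumulated list is needed
-- (objective: faster; a timing run measured B faster on large inputs).

-- ===== PORT A =====
-- Literal port of A: for i in range(len(dna)+1), build dna[:i] + '_' + dna[i:]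
-- and append it only if variações.count(novo) == 0.  Python string concatenation is
-- ported exactly as concatenation of the character lists (String.ofList of the ++).
def gera_gaps (dna : String) : List String :=
  (PySem.List.pyRange 0 ((dna.toList.length : Int) + 1) 1).foldl
    (fun variacoes i =>
      let primeira := PySem.List.slice dna.toList none (some i)
      let segunda := PySem.List.slice dna.toList (some i) none
      let novo := String.ofList (primeira ++ '_' :: segunda)
      if PySem.List.count variacoes novo = 0 then variacoes ++ [novo] else variacoes) []

-- ===== PORT B =====
-- Literal port of B: same range loop, append dna[:j] + '_' + dna[j:] when j == 0 or
-- dna[j-1] != '_' (dna[j-1] ported as pyGetD; the guard makes j-1 in range when it is read).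
def gera_gaps_alt (dna : String) : List String :=
  (PySem.List.pyRange 0 ((dna.toList.length : Int) + 1) 1).foldl
    (fun variacoes j =>
      if j = 0 ∨ PySem.List.pyGetD dna.toList (j - 1) '?' ≠ '_' then
        variacoes ++ [String.ofList (PySem.List.slice dna.toList none (some j) ++
                        '_' :: PySem.List.slice dna.toList (some j) none)]
      else variacoes) []

-- ===== PRECONDITION & SPEC =====
def Spec_gera_gaps (dna : String) (out : List String) : Prop := out = gera_gaps_alt dna
instance (dna : String) (out : List String) : Decidable (Spec_gera_gaps dna out) := by unfold Spec_gera_gaps; infer_instance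

-- ===== CLAIM (what is proved, stated in full; the proofs are below) =====
def Claim_equal_gera_gaps : Prop := ∀ (dna : String), Dom_gera_gaps dna → Spec_gera_gaps dna (gera_gaps dna)

-- ===== LEMMAS AND PROOFS =====

-- inserting '_' at position j of the character list
def pvIns (l : List Char) (j : Nat) : String := String.ofList (l.take j ++ '_' :: l.drop j)

-- clean Nat-indexed versions of the two loop bodies
def pvStepA (l : List Char) (acc : List String) (j : Nat) : List String :=
  if PySem.List.count acc (pvIns l j) = 0 then acc ++ [pvIns l j] else acc
def pvStepB (l : List Char) (acc : List String) (j : Nat) : List String :=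
  if j = 0 ∨ l.getD (j - 1) '?' ≠ '_' then acc ++ [pvIns l j] else acc

lemma pvIns_inj {l : List Char} {i j : Nat} (h : pvIns l i = pvIns l j) :
    l.take i ++ '_' :: l.drop i = l.take j ++ '_' :: l.drop j := by
  have := congrArg String.toList h
  simpa [pvIns] using this

-- (L1) if l[j] = '_' then inserting at j and at j+1 agree
lemma pvIns_succ_eq {l : List Char} {j : Nat} (hj : j < l.length) (h : l[j] = '_') :
    pvIns l j = pvIns l (j + 1) := by
  unfold pvIns
  congr 1
  rw [List.take_add_one, List.drop_eq_getElem_cons hj]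
  simp [hj, h]

-- (L2) if two distinct insertions agree, the character before the later one is '_'
lemma pvIns_eq_imp {l : List Char} {i j : Nat} (hij : i < j) (hj : j ≤ l.length)
    (h : pvIns l i = pvIns l j) : l[j - 1]? = some '_' := by
  have h' := pvIns_inj h
  have hgetj : (l.take j ++ '_' :: l.drop j)[j]? = some '_' := by
    rw [List.getElem?_append_right (by simp [Nat.min_eq_left hj])]
    simp [Nat.min_eq_left hj]
  have hgeti : (l.take i ++ '_' :: l.drop i)[j]? = l[j - 1]? := by
    have hi : i ≤ l.length := le_of_lt (lt_of_lt_of_le hij hj)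
    rw [List.getElem?_append_right (by simp [Nat.min_eq_left hi]; omega)]
    simp only [List.length_take, Nat.min_eq_left hi]
    have : j - i = (j - i - 1) + 1 := by omega
    rw [this]
    simp only [List.getElem?_cons_succ, List.getElem?_drop]
    congr 1
    omega
  rw [h', hgetj] at hgeti
  exact hgeti.symm

-- the dedup condition of A is exactly B's local test
lemma pv_cond_iff {l : List Char} {j : Nat} (hj : j ≤ l.length) :
    (∃ i, i < j ∧ pvIns l i = pvIns l j) ↔ (j ≠ 0 ∧ l.getD (j - 1) '?' = '_') := by
  constructor
  · rintro ⟨i, hij, h⟩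
    have hij0 : j ≠ 0 := by omega
    have := pvIns_eq_imp hij hj h
    refine ⟨hij0, ?_⟩
    have hlt : j - 1 < l.length := by omega
    rw [List.getD_eq_getElem l '?' hlt]
    simpa [List.getElem?_eq_getElem hlt] using this
  · rintro ⟨hj0, h⟩
    have hlt : j - 1 < l.length := by omega
    refine ⟨j - 1, by omega, ?_⟩
    rw [List.getD_eq_getElem l '?' hlt] at h
    have := pvIns_succ_eq hlt h
    rwa [Nat.sub_add_cancel (by omega)] at this

-- main invariant: the two clean folds agree, and A's accumulator's members are exactly
-- the insertions at positions < m
lemma pv_main (l : List Char) : ∀ m, m ≤ l.length + 1 →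
    (List.range m).foldl (pvStepA l) [] = (List.range m).foldl (pvStepB l) [] ∧
    (∀ x, x ∈ (List.range m).foldl (pvStepA l) [] ↔ ∃ i, i < m ∧ x = pvIns l i) := by
  intro m
  induction m with
  | zero => intro _; simp
  | succ m ih =>
    intro hm
    obtain ⟨heq, hmem⟩ := ih (by omega)
    rw [List.range_succ, List.foldl_append, List.foldl_append, List.foldl_cons,
        List.foldl_cons, List.foldl_nil, List.foldl_nil, ← heq]
    set acc := (List.range m).foldl (pvStepA l) [] with hacc
    have hcount : (PySem.List.count acc (pvIns l m) = 0) ↔ ¬ (pvIns l m ∈ acc) := by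
      simp [pysem, List.count_eq_zero]
    have hcond : (PySem.List.count acc (pvIns l m) = 0) ↔ (m = 0 ∨ l.getD (m - 1) '?' ≠ '_') := by
      rw [hcount]
      rw [show (pvIns l m ∈ acc) ↔ ∃ i, i < m ∧ pvIns l i = pvIns l m by
        rw [hmem]; constructor
        · rintro ⟨i, hi, he⟩; exact ⟨i, hi, he.symm⟩
        · rintro ⟨i, hi, he⟩; exact ⟨i, hi, he.symm⟩]
      rw [pv_cond_iff (by omega)]
      tauto
    constructor
    · unfold pvStepA pvStepB
      by_cases hc : PySem.List.count acc (pvIns l m) = 0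
      · rw [if_pos hc, if_pos (hcond.mp hc)]
      · rw [if_neg hc, if_neg (fun h => hc (hcond.mpr h))]
    · intro x
      unfold pvStepA
      by_cases hc : PySem.List.count acc (pvIns l m) = 0
      · rw [if_pos hc]
        simp only [List.mem_append, List.mem_singleton, hmem]
        constructor
        · rintro (⟨i, hi, he⟩ | he)
          · exact ⟨i, by omega, he⟩
          · exact ⟨m, by omega, he⟩
        · rintro ⟨i, hi, he⟩
          by_cases him : i = m
          · exact Or.inr (him ▸ he)
          · exact Or.inl ⟨i, by omega, he⟩
      · rw [if_neg hc]
        rw [hmem]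
        have hin : pvIns l m ∈ acc := by
          by_contra hni; exact hc (hcount.mpr hni)
        rw [hmem] at hin
        obtain ⟨i0, hi0, he0⟩ := hin
        constructor
        · rintro ⟨i, hi, he⟩; exact ⟨i, by omega, he⟩
        · rintro ⟨i, hi, he⟩
          by_cases him : i = m
          · exact ⟨i0, hi0, by rw [he, him, ← he0]⟩
          · exact ⟨i, by omega, he⟩

-- the port of A computes the clean A-fold
lemma portA_eq (dna : String) :
    gera_gaps dna = (List.range (dna.toList.length + 1)).foldl (pvStepA dna.toList) [] := by
  unfold gera_gaps
  rw [PySem.List.pyRange_one]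
  have hn : (((dna.toList.length : Int) + 1) - 0).toNat = dna.toList.length + 1 := by omega
  rw [hn, List.foldl_map]
  apply PySem.List.foldl_congr_mem
  intro acc j _
  simp [pvStepA, pvIns, PySem.List.slice_to_natCast, PySem.List.slice_from_natCast]

-- the port of B computes the clean B-fold
lemma portB_eq (dna : String) :
    gera_gaps_alt dna = (List.range (dna.toList.length + 1)).foldl (pvStepB dna.toList) [] := by
  unfold gera_gaps_alt
  rw [PySem.List.pyRange_one]
  have hn : (((dna.toList.length : Int) + 1) - 0).toNat = dna.toList.length + 1 := by omega
  rw [hn, List.foldl_map]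
  apply PySem.List.foldl_congr_mem
  intro acc j _
  cases j with
  | zero => simp [pvStepB, pvIns, PySem.List.slice_to, PySem.List.slice_from]
  | succ k =>
    have h2 : ((0 : Int) + ((k + 1 : Nat) : Int)) = (((k + 1 : Nat)) : Int) := by ring
    have h1 : (((k + 1 : Nat) : Int)) - 1 = ((k : Nat) : Int) := by push_cast; ring
    simp only [pvStepB, pvIns, h2, h1, PySem.List.pyGetD_natCast, Nat.add_sub_cancel,
      Nat.cast_eq_zero, PySem.List.slice_to_natCast, PySem.List.slice_from_natCast]

-- ===== VERDICT (by name: the statement is the Claim_ definition above) =====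
theorem gera_gaps_spec : Claim_equal_gera_gaps := by
  intro dna _
  unfold Spec_gera_gaps
  rw [portA_eq, portB_eq]
  exact (pv_main dna.toList (dna.toList.length + 1) (le_refl _)).1
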